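-- pv_equiv track=rewrite | github.com/JacobWittrig/CodeJW | School Code/csci1133/homeworks/hw4/hw4.py | rm_num_combine
-- ===== SOURCE A (Python) =====
-- def rm_num_combine(str1,str2):
--   retstring=""
--   while len(str1)+len(str2)>0:
--     if len(str1)>0:
--         if not str1[0].isdigit():
--             retstring+=(str1[0])
--         str1=str1[1:]
--     if len(str2)>0:
--         if not str2[0].isdigit():
--             retstring+=(str2[0])
--         str2=str2[1:]
--   return retstring
-- ===== SOURCE B (Python) =====
-- from itertools import zip_longest
--
-- def rm_num_combine(str1, str2):
--     # pass 1: build the full interleaved string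
--     parts = []
--     for a, b in zip_longest(str1, str2, fillvalue=''):
--         parts.append(a)
--         parts.append(b)
--     interleaved = ''.join(parts)
--     # pass 2: filter out digits
--     return ''.join(c for c in interleaved if not c.isdigit())
-- ===== Notes on version B (the rewrite author's own statement) =====
-- stated objective: alternative
-- what changed: B first materialises the full interleaved string via zip_longest and then filters digits in a separate second pass, instead of A's fused while-loop that repeatedly reslices both strings while filtering inline.
import Mathlib
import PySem

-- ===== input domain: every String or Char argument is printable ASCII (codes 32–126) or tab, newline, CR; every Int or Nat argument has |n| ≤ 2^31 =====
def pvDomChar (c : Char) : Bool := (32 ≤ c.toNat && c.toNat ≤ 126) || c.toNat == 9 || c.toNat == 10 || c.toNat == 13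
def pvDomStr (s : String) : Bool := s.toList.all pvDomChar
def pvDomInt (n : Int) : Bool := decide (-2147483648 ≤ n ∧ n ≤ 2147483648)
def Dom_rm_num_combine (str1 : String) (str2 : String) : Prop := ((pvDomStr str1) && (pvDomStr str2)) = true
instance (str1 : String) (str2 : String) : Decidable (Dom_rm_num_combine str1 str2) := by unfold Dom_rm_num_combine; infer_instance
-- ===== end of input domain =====

-- B interleaves the two strings completely first (zip_longest) and filters digits
-- in a separate second pass, instead of A's fused reslicing while-loop. Return value only; no mutation.

-- ===== PORT A =====
-- A's while loop: each iteration consumes the head of each nonempty string,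
-- appending it to the accumulator when it is not a digit.
def rmA (s1 s2 acc : List Char) : List Char :=
  match s1, s2 with
  | [], [] => acc
  | a :: t1, [] =>
      rmA t1 [] (if PySem.Chars.isdigit a then acc else acc ++ [a])
  | [], b :: t2 =>
      rmA [] t2 (if PySem.Chars.isdigit b then acc else acc ++ [b])
  | a :: t1, b :: t2 =>
      let acc1 := if PySem.Chars.isdigit a then acc else acc ++ [a]
      let acc2 := if PySem.Chars.isdigit b then acc1 else acc1 ++ [b]
      rmA t1 t2 acc2

def rm_num_combine (str1 : String) (str2 : String) : String :=
  String.ofList (rmA str1.toList str2.toList [])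

-- ===== PORT B =====
-- pass 1: full interleaved sequence (zip_longest with fillvalue='')
def interleave (s1 s2 : List Char) : List Char :=
  match s1, s2 with
  | [], ys => ys
  | xs, [] => xs
  | a :: t1, b :: t2 => a :: b :: interleave t1 t2

def rm_num_combine_alt (str1 : String) (str2 : String) : String :=
  String.ofList ((interleave str1.toList str2.toList).filter (fun c => !PySem.Chars.isdigit c))

-- ===== PRECONDITION & SPEC =====
def Spec_rm_num_combine (str1 : String) (str2 : String) (out : String) : Prop := out = rm_num_combine_alt str1 str2
instance (str1 : String) (str2 : String) (out : String) : Decidable (Spec_rm_num_combine str1 str2 out) := by unfold Spec_rm_num_combine; infer_instance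

-- ===== CLAIM =====
def Claim_equal_rm_num_combine : Prop := ∀ (str1 : String) (str2 : String), Dom_rm_num_combine str1 str2 → Spec_rm_num_combine str1 str2 (rm_num_combine str1 str2)

-- ===== LEMMAS AND PROOFS =====
theorem interleave_nil_right (s : List Char) : interleave s [] = s := by
  cases s <;> rfl

theorem rmA_eq (s1 s2 acc : List Char) :
    rmA s1 s2 acc = acc ++ (interleave s1 s2).filter (fun c => !PySem.Chars.isdigit c) := by
  induction s1 generalizing s2 acc with
  | nil =>
    induction s2 generalizing acc with
    | nil => simp [rmA, interleave]
    | cons b t2 ih =>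
      simp only [rmA, interleave, List.filter, ih]
      by_cases h : PySem.Chars.isdigit b <;> simp [h]
  | cons a t1 ih =>
    cases s2 with
    | nil =>
      simp only [rmA, interleave_nil_right, List.filter, ih]
      by_cases h : PySem.Chars.isdigit a <;> simp [h]
    | cons b t2 =>
      simp only [rmA, interleave, List.filter, ih]
      by_cases h1 : PySem.Chars.isdigit a <;> by_cases h2 : PySem.Chars.isdigit b <;>
        simp [h1, h2]

-- ===== VERDICT =====
theorem rm_num_combine_spec : Claim_equal_rm_num_combine := by
  intro str1 str2 _
  unfold Spec_rm_num_combine rm_num_combine rm_num_combine_alt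
  rw [rmA_eq]
  simp
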